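-- pv_equiv track=rewrite | github.com/le-chartreux/pyprocgen | packages/board_functions.py | is_seed
-- ===== SOURCE A (Python) =====
-- def is_seed(seed_in_string: str) -> bool:
--     # =============================
--     # INFORMATIONS :
--     # -----------------------------
--     # UTILITÉ :
--     # Vérifie que seed_in_string est bien
--     # de la forme a + ":" + b + ":" + c + ":" + d
--     # avec a,b,c,d str(integers)
--     # -----------------------------
--     # PRECONDITIONS :
--     # - None
--     # -----------------------------
--     # DEPEND DE :
--     # - None
--     # -----------------------------
--     # UTILISE PAR :
--     # - procedural_generation_2D.py
--     # =============================
--     colon_counter = 0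
--     position_counter = 0
--     # number_of_following_colon est initialisé à 1 pour contrer le cas où seed_in_string[0] == ":"
--     number_of_following_colon = 1
--
--     while (
--         position_counter < len(seed_in_string)
--         and seed_in_string[position_counter] in ("0123456789-:")
--         and number_of_following_colon != 2
--         and not (  # Pour éviter un - au milieu d'un entier
--             position_counter != 0
--             and seed_in_string[position_counter] == "-"
--             and seed_in_string[position_counter - 1] != ":"
--         )
--     ):
--
--         if seed_in_string[position_counter] == ":":
--             colon_counter += 1
--             number_of_following_colon += 1
--
--         else:
--             number_of_following_colon = 0
--
--         position_counter += 1
--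
--     return (
--         position_counter == len(seed_in_string)
--         and colon_counter == 3
--         and number_of_following_colon == 0
--     )
-- ===== SOURCE B (Python) =====
-- def is_seed(seed_in_string: str) -> bool:
--     parts = seed_in_string.split(":")
--     if len(parts) != 4:
--         return False
--     for part in parts:
--         if not part:
--             return False
--         body = part[1:] if part[0] == "-" else part
--         if any(c not in "0123456789" for c in body):
--             return False
--     return True
-- ===== Notes on version B (the rewrite author's own statement) =====
-- stated objective: simpler
-- what changed: Replaces A's single stateful character scan (colon counter, consecutive-colon flag, previous-character checks) with splitting the string on the colon separator into parts, then checking that there are exactly four parts and each part is nonempty with an optional leading minus sign followed only by ASCII digits.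
import Mathlib
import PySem

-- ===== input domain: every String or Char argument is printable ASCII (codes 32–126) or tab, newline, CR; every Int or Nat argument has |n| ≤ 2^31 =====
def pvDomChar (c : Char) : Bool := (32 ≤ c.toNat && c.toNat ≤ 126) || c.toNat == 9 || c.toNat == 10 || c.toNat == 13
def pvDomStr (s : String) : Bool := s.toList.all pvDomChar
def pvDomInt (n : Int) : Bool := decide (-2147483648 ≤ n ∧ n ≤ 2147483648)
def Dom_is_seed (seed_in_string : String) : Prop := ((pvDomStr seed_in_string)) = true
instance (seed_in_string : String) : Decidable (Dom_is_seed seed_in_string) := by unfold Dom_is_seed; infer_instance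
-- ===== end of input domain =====

-- B replaces A's stateful character scan with split-on-':' plus per-part validation; objective: simpler.


-- ===== PORT A =====
-- 'c in "0123456789-:"' for the single character c (substring test of a length-1 string = membership)
def pvAllowedChar (c : Char) : Bool := "0123456789-:".toList.contains c

-- the while loop: state (position_counter, colon_counter, number_of_following_colon)
def isSeedLoop (cs : List Char) (pos colon nfc : Nat) : Nat × Nat × Nat :=
  if h : pos < cs.length ∧
      pvAllowedChar (cs.getD pos ' ') = true ∧
      nfc ≠ 2 ∧
      ¬(pos ≠ 0 ∧ cs.getD pos ' ' = '-' ∧ cs.getD (pos - 1) ' ' ≠ ':') then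
    if cs.getD pos ' ' = ':' then isSeedLoop cs (pos + 1) (colon + 1) (nfc + 1)
    else isSeedLoop cs (pos + 1) colon 0
  else (pos, colon, nfc)
termination_by cs.length - pos
decreasing_by all_goals omega

def is_seed (seed_in_string : String) : Bool :=
  let cs := seed_in_string.toList
  let r := isSeedLoop cs 0 0 1
  r.1 == cs.length && r.2.1 == 3 && r.2.2 == 0

-- ===== PORT B =====
-- one part is valid: nonempty, optional leading '-', all remaining characters ASCII digits
def validPart (p : List Char) : Bool :=
  if p.isEmpty then false
  else (if p.headD ' ' == '-' then p.drop 1 else p).all (fun c => "0123456789".toList.contains c)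

def is_seed_alt (seed_in_string : String) : Bool :=
  let parts := PySem.Chars.splitOn seed_in_string.toList [':']
  if parts.length != 4 then false else parts.all validPart

-- ===== PRECONDITION & SPEC =====
def Spec_is_seed (seed_in_string : String) (out : Bool) : Prop := out = is_seed_alt seed_in_string
instance (seed_in_string : String) (out : Bool) : Decidable (Spec_is_seed seed_in_string out) := by unfold Spec_is_seed; infer_instance

-- ===== CLAIM (what is proved, stated in full; the proofs are below) =====
def Claim_equal_is_seed : Prop := ∀ (seed_in_string : String), Dom_is_seed seed_in_string → Spec_is_seed seed_in_string (is_seed seed_in_string)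

-- ===== LEMMAS AND PROOFS =====

-- structural description of split-on-':' : (first part, remaining parts)
def splitAux : List Char → List Char × List (List Char)
  | [] => ([], [])
  | c :: t =>
    let r := splitAux t
    if c = ':' then ([], r.1 :: r.2) else (c :: r.1, r.2)

-- the loop's state machine on the unread suffix; returns (length of the unread rest, colon, nfc)
def runM : List Char → Nat → Nat → Nat × Nat × Nat
  | [], colon, nfc => (0, colon, nfc)
  | c :: t, colon, nfc =>
    if pvAllowedChar c = true ∧ nfc ≠ 2 ∧ ¬(c = '-' ∧ nfc = 0) then
      if c = ':' then runM t (colon + 1) (nfc + 1) else runM t colon 0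
    else (t.length + 1, colon, nfc)

lemma runM_fst_le (l : List Char) (colon nfc : Nat) : (runM l colon nfc).1 ≤ l.length := by
  induction l generalizing colon nfc with
  | nil => simp [runM]
  | cons c t ih =>
    simp only [runM]
    split
    · split
      · exact le_trans (ih _ _) (by simp)
      · exact le_trans (ih _ _) (by simp)
    · simp

lemma getD_append_len (pre : List Char) (c : Char) (t : List Char) :
    (pre ++ c :: t).getD pre.length ' ' = c := by
  simp [List.getD]

lemma getD_append_pred (pre : List Char) (h : pre ≠ []) (l : List Char) :
    (pre ++ l).getD (pre.length - 1) ' ' = pre.getD (pre.length - 1) ' ' := by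
  have hl : 0 < pre.length := List.length_pos_of_ne_nil h
  have h1 : pre.length - 1 < pre.length := by omega
  rw [List.getD, List.getD, List.getElem?_append_left h1]

-- bridge: the indexed while loop equals the state machine on the unread suffix
lemma isSeedLoop_eq_runM (rest : List Char) : ∀ (pre : List Char) (colon nfc : Nat),
    (pre = [] → nfc = 1) →
    (pre ≠ [] → (nfc = 0 ↔ pre.getD (pre.length - 1) ' ' ≠ ':')) →
    isSeedLoop (pre ++ rest) pre.length colon nfc =
      ((pre ++ rest).length - (runM rest colon nfc).1,
       (runM rest colon nfc).2.1, (runM rest colon nfc).2.2) := by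
  induction rest with
  | nil =>
    intro pre colon nfc _ _
    rw [isSeedLoop]
    simp [runM]
  | cons c t ih =>
    intro pre colon nfc hnil hlast
    have hget : (pre ++ c :: t).getD pre.length ' ' = c := getD_append_len pre c t
    have hlen : pre.length < (pre ++ c :: t).length := by simp
    -- the two loop conditions agree
    have hcond : (pre.length < (pre ++ c :: t).length ∧
        pvAllowedChar ((pre ++ c :: t).getD pre.length ' ') = true ∧ nfc ≠ 2 ∧
        ¬(pre.length ≠ 0 ∧ (pre ++ c :: t).getD pre.length ' ' = '-' ∧
          (pre ++ c :: t).getD (pre.length - 1) ' ' ≠ ':')) ↔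
        (pvAllowedChar c = true ∧ nfc ≠ 2 ∧ ¬(c = '-' ∧ nfc = 0)) := by
      rw [hget]
      constructor
      · rintro ⟨-, ha, h2, h3⟩
        refine ⟨ha, h2, ?_⟩
        rintro ⟨hc, hz⟩
        by_cases hp : pre = []
        · rw [hnil hp] at hz; omega
        · have hprev := (hlast hp).mp hz
          rw [getD_append_pred pre hp] at h3
          have hl0 : pre.length ≠ 0 := fun h => hp (List.eq_nil_of_length_eq_zero h)
          exact h3 ⟨hl0, hc, hprev⟩
      · rintro ⟨ha, h2, h3⟩
        refine ⟨hlen, ha, h2, ?_⟩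
        rintro ⟨hp, hc, hprev⟩
        have hne : pre ≠ [] := by
          intro h; rw [h] at hp; simp at hp
        rw [getD_append_pred pre hne] at hprev
        exact h3 ⟨hc, (hlast hne).mpr hprev⟩
    have hgetc : (pre ++ [c]).getD ((pre ++ [c]).length - 1) ' ' = c := by
      have : (pre ++ [c]).length - 1 = pre.length := by simp
      rw [this]
      exact getD_append_len pre c []
    rw [isSeedLoop]
    by_cases hrhs : pvAllowedChar c = true ∧ nfc ≠ 2 ∧ ¬(c = '-' ∧ nfc = 0)
    · rw [dif_pos (hcond.mpr hrhs), hget]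
      by_cases hc : c = ':'
      · rw [if_pos hc]
        simp only [runM, if_pos hrhs, if_pos hc]
        have := ih (pre ++ [c]) (colon + 1) (nfc + 1)
          (by simp) (by intro h; rw [hgetc]; subst hc; simp)
        simpa [List.append_assoc] using this
      · rw [if_neg hc]
        simp only [runM, if_pos hrhs, if_neg hc]
        have := ih (pre ++ [c]) colon 0
          (by simp) (by intro h; rw [hgetc]; simpa using hc)
        simpa [List.append_assoc] using this
    · rw [dif_neg (fun h => hrhs (hcond.mp h))]
      simp only [runM, if_neg hrhs]
      simp

-- a state with nfc = 2 always fails the final test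
lemma runCheck_two (l : List Char) (colon : Nat) :
    ((runM l colon 2).1 == 0 && (runM l colon 2).2.1 == 3 && (runM l colon 2).2.2 == 0) = false := by
  cases l with
  | nil => simp [runM]
  | cons c t => simp [runM]

lemma allowed_chars_eq : "0123456789-:".toList = ['0','1','2','3','4','5','6','7','8','9','-',':'] := by decide

lemma digit_chars_eq : "0123456789".toList = ['0','1','2','3','4','5','6','7','8','9'] := by decide

lemma isDig_of_allowed {c : Char} (h : pvAllowedChar c = true) (h1 : c ≠ '-') (h2 : c ≠ ':') :
    ("0123456789".toList.contains c) = true := by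
  simp only [pvAllowedChar, allowed_chars_eq, digit_chars_eq, List.contains_eq_mem,
    List.mem_cons, List.not_mem_nil, decide_eq_true_eq] at h ⊢
  tauto

lemma not_allowed_not_dig {c : Char} (h : ¬ pvAllowedChar c = true) :
    ("0123456789".toList.contains c) = false := by
  simp only [pvAllowedChar, allowed_chars_eq, digit_chars_eq, List.contains_eq_mem,
    List.mem_cons, List.not_mem_nil, decide_eq_true_eq, decide_eq_false_iff_not] at h ⊢
  tauto

-- main induction: the machine's acceptance vs the split-based check,
-- from a token boundary (nfc = 1) and from inside a token (nfc = 0)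
lemma runM_check (l : List Char) : ∀ colon : Nat,
    (((runM l colon 1).1 == 0 && (runM l colon 1).2.1 == 3 && (runM l colon 1).2.2 == 0) =
      ((splitAux l).2.length + 1 + colon == 4 && validPart (splitAux l).1 &&
        (splitAux l).2.all validPart)) ∧
    (((runM l colon 0).1 == 0 && (runM l colon 0).2.1 == 3 && (runM l colon 0).2.2 == 0) =
      ((splitAux l).2.length + 1 + colon == 4 &&
        (splitAux l).1.all (fun c => "0123456789".toList.contains c) &&
        (splitAux l).2.all validPart)) := by
  induction l with
  | nil =>
    intro colon
    constructor
    · simp [runM, splitAux, validPart]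
    · simp only [runM, splitAux]
      simp only [List.length_nil, List.all_nil, Bool.and_true]
      have : (colon == 3) = (0 + 1 + colon == 4) := by
        by_cases h : colon = 3
        · simp [h]
        · simp [h]
          omega
      simpa using this
  | cons c t ih =>
    intro colon
    by_cases hc : c = ':'
    · subst hc
      constructor
      · -- boundary, ':' : nfc becomes 2, always fails; RHS has the empty part
        have hstep : runM (':' :: t) colon 1 = runM t (colon + 1) 2 := by
          simp only [runM]
          rw [if_pos ⟨by decide, by decide, by simp⟩]
          simp
        rw [hstep, runCheck_two]
        simp [splitAux, validPart, Bool.and_assoc]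
      · -- mid, ':' : close the token, move to boundary with colon+1
        have hstep : runM (':' :: t) colon 0 = runM t (colon + 1) 1 := by
          simp only [runM]
          rw [if_pos ⟨by decide, by decide, by simp⟩]
          simp
        rw [hstep, (ih (colon + 1)).1]
        have harith : (splitAux t).2.length + 1 + (colon + 1) = (splitAux t).2.length + 1 + 1 + colon := by omega
        rw [harith]
        simp [splitAux, Bool.and_assoc]
    · by_cases hm : c = '-'
      · subst hm
        constructor
        · -- boundary, '-' : accepted, token starts with '-'
          have hstep : runM ('-' :: t) colon 1 = runM t colon 0 := by
            simp only [runM]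
            rw [if_pos ⟨by decide, by decide, by simp⟩]
            simp
          rw [hstep, (ih colon).2]
          simp [splitAux, validPart, Bool.and_assoc]
        · -- mid, '-' : forbidden, loop stops with unread input
          have hstep : runM ('-' :: t) colon 0 = (t.length + 1, colon, 0) := by
            simp only [runM]
            rw [if_neg (by simp)]
          rw [hstep]
          simp [splitAux]
      · by_cases ha : pvAllowedChar c = true
        · have hd : ("0123456789".toList.contains c) = true := isDig_of_allowed ha hm hc
          have hmem : c ∈ ['0','1','2','3','4','5','6','7','8','9'] := by
            have h := hd
            rw [digit_chars_eq] at h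
            simpa using h
          constructor
          · have hstep : runM (c :: t) colon 1 = runM t colon 0 := by
              simp only [runM]
              rw [if_pos ⟨ha, by decide, by simp [hm]⟩]
              simp [hc]
            rw [hstep, (ih colon).2]
            fin_cases hmem <;> simp [splitAux, validPart, Bool.and_assoc]
          · have hstep : runM (c :: t) colon 0 = runM t colon 0 := by
              simp only [runM]
              rw [if_pos ⟨ha, by decide, fun h => hm h.1⟩]
              simp [hc]
            rw [hstep, (ih colon).2]
            fin_cases hmem <;> simp [splitAux, Bool.and_assoc]
        · have hd : ("0123456789".toList.contains c) = false := not_allowed_not_dig ha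
          have hnd : ¬(c = '0' ∨ c = '1' ∨ c = '2' ∨ c = '3' ∨ c = '4' ∨ c = '5' ∨ c = '6' ∨ c = '7' ∨ c = '8' ∨ c = '9') := by
            have h := hd
            rw [digit_chars_eq] at h
            simpa using h
          constructor
          · have hstep : runM (c :: t) colon 1 = (t.length + 1, colon, 1) := by
              simp only [runM]
              rw [if_neg (fun h => ha h.1)]
            rw [hstep]
            simp [splitAux, if_neg hc, validPart, hm, Bool.and_assoc]
            exact fun _ h => absurd h hnd
          · have hstep : runM (c :: t) colon 0 = (t.length + 1, colon, 0) := by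
              simp only [runM]
              rw [if_neg (fun h => ha h.1)]
            rw [hstep]
            simp [splitAux, if_neg hc, Bool.and_assoc]
            exact fun _ h => absurd h hnd

-- PySem's split on ":" computes splitAux
lemma splitOn_go_eq (s : List Char) : ∀ (fuel : Nat), s.length < fuel → ∀ (cur : List Char) (acc : List (List Char)),
    PySem.Chars.splitOn.go [':'] fuel s cur acc =
      acc.reverse ++ ((cur.reverse ++ (splitAux s).1) :: (splitAux s).2) := by
  induction s with
  | nil =>
    intro fuel hf cur acc
    match fuel, hf with
    | fuel + 1, _ =>
      simp [PySem.Chars.splitOn.go, splitAux]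
  | cons c t ih =>
    intro fuel hf cur acc
    match fuel, hf with
    | fuel + 1, hf =>
      have ht : t.length < fuel := by simp at hf; omega
      by_cases hc : c = ':'
      · subst hc
        have hstep : PySem.Chars.splitOn.go [':'] (fuel + 1) (':' :: t) cur acc
            = PySem.Chars.splitOn.go [':'] fuel t [] (cur.reverse :: acc) := rfl
        rw [hstep, ih fuel ht]
        simp [splitAux]
      · have hpre : [':'].isPrefixOf (c :: t) = false := by
          simp [List.isPrefixOf]
          exact fun h => hc h.symm
        have hstep : PySem.Chars.splitOn.go [':'] (fuel + 1) (c :: t) cur acc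
            = PySem.Chars.splitOn.go [':'] fuel t (c :: cur) acc := by
          rw [PySem.Chars.splitOn.go.eq_def]
          simp [hpre]
        rw [hstep, ih fuel ht]
        simp [splitAux, hc]

lemma splitOn_eq_splitAux (s : List Char) :
    PySem.Chars.splitOn s [':'] = (splitAux s).1 :: (splitAux s).2 := by
  rw [PySem.Chars.splitOn, splitOn_go_eq s (s.length + 1) (by omega)]
  simp

-- ===== VERDICT (by name: the statement is the Claim_ definition above) =====
theorem is_seed_spec : Claim_equal_is_seed := by
  intro s _
  unfold Spec_is_seed
  simp only [is_seed, is_seed_alt]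
  have hb := isSeedLoop_eq_runM s.toList [] 0 1 (fun _ => rfl) (by simp)
  simp only [List.nil_append, List.length_nil] at hb
  rw [hb]
  have hle := runM_fst_le s.toList 0 1
  have hsub : (s.toList.length - (runM s.toList 0 1).1 == s.toList.length) =
      ((runM s.toList 0 1).1 == 0) := by
    by_cases h : (runM s.toList 0 1).1 = 0
    · simp [h]
    · have hle' : (runM s.toList 0 1).1 ≤ s.length := by simpa using hle
      have hne : ¬ s.length - (runM s.toList 0 1).1 = s.length := by omega
      simp [h, hne]
  rw [splitOn_eq_splitAux]
  have hmain := (runM_check s.toList 0).1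
  simp only [Nat.add_zero] at hmain
  simp only [hsub]
  rw [hmain]
  have hlen : ((splitAux s.toList).1 :: (splitAux s.toList).2).length = (splitAux s.toList).2.length + 1 := by simp
  by_cases h4 : (splitAux s.toList).2.length + 1 = 4
  · simp [hlen, h4]
  · have h1 : ((splitAux s.toList).2.length + 1 == 4) = false := by simpa using h4
    simp [hlen, h1]
    intro h3
    exact absurd (show (splitAux s.toList).2.length + 1 = 4 by omega) h4
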